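-- pv_equiv track=rewrite | github.com/sbhambr1/symbolic_planning_and_rl | lin/SDRL_Project/learning_agents/utils/trajectory_utils.py | split_fixed_length_traj
-- ===== SOURCE A (Python) =====
-- def split_fixed_length_traj(trajs, fixed_len):
--     """
--     Return a list traj of the same length.
--     If the the length of a traj is smaller than the fixed_len, we do padding by replicating parts of the traj
--     :param: indexed_trajs: list of indexed_trajs
--     """
--     fixed_len_trajs = []
--     for traj in trajs:
--         traj_len = len(traj)
--
--         # if the length of the traj is smaller than fixed_len
--         if traj_len < fixed_len:
--             fixed_len_traj = []
--
--             remain_padding_len = fixed_len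
--             while True:
--                 fixed_len_traj = fixed_len_traj + list(traj)
--                 remain_padding_len = remain_padding_len - traj_len
--                 if remain_padding_len - traj_len <= 0:
--                     break
--             fixed_len_traj = fixed_len_traj + [traj[i] for i in range(0, remain_padding_len)]
--             fixed_len_trajs.append(fixed_len_traj)
--         # if the length of the traj is greater than fixed_len
--         else:
--             start_idx = 0
--             end_idx = start_idx + fixed_len  # end idx is exclusive
--             while end_idx <= traj_len:
--                 fixed_len_trajs.append([traj[i] for i in range(start_idx, end_idx)])
--                 start_idx += fixed_len
--                 end_idx = start_idx + fixed_len
--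
--             # if we need to do padding
--             if start_idx < traj_len:
--                 padding_traj = [traj[i] for i in range(start_idx, traj_len)]
--
--                 n_repeat_transition = fixed_len - (traj_len - start_idx)
--                 repeat_start_idx = traj_len - n_repeat_transition
--                 repeat_end_idx = traj_len  # end idx is exclusive
--                 padding_traj = padding_traj + [traj[i] for i in range(repeat_start_idx, repeat_end_idx)]
--                 fixed_len_trajs.append(padding_traj)
--     return fixed_len_trajs
-- ===== SOURCE B (Python) =====
-- def split_fixed_length_traj(trajs, fixed_len):
--     # B pads each trajectory up front to an exact multiple of fixed_len
--     # (cyclic extension when shorter, tail-copy when a remainder is left),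
--     # then cuts the padded stream into equal slices uniformly.
--     out = []
--     for traj in trajs:
--         n = len(traj)
--         if n < fixed_len:
--             stream = [traj[i % n] for i in range(fixed_len)]
--         else:
--             rem = n % fixed_len
--             stream = list(traj)
--             if rem:
--                 stream += traj[n - (fixed_len - rem):]
--         out += [stream[s:s + fixed_len] for s in range(0, len(stream), fixed_len)]
--     return out
-- ===== Notes on version B (the rewrite author's own statement) =====
-- stated objective: alternative
-- what changed: B reverses A's split-then-patch order: it first pads each trajectory up front into a stream whose length is an exact multiple of fixed_len (cyclic extension when shorter, tail-copy when a remainder is left), then cuts that stream into equal slices in one uniform pass with no per-chunk index loop and no final-chunk special case.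
import Mathlib
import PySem

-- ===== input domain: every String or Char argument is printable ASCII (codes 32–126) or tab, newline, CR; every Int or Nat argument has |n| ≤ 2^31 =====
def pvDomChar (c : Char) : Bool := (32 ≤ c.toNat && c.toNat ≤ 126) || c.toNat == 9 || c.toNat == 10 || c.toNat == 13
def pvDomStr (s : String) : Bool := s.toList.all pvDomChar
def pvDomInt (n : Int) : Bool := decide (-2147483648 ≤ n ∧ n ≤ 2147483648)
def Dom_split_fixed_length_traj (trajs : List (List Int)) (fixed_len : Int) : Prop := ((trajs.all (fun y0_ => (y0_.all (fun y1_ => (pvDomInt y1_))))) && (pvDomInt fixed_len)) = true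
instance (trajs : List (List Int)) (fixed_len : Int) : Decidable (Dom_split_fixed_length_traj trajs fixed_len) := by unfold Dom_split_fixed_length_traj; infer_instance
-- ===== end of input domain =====

-- B reverses A's split-then-patch order: it pads each trajectory up front to an exact
-- multiple of fixed_len, then cuts the padded stream into equal slices in one uniform
-- pass with no final-chunk special case (objective: alternative decomposition).

-- ===== PORT A =====

-- [traj[i] for i in range(a, b)]; exact because every index used under Pre_ is in range
def pvComp (t : List Int) (a b : Int) : List Int :=
  (PySem.List.pyRange a b 1).map (fun i => PySem.List.pyGetD t i 0)

-- A's `while True:` padding loop; fuel only makes it total (never exhausted under Pre_)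
def pvPadLoop (t : List Int) (acc : List Int) (remain : Int) : Nat → List Int × Int
  | 0 => (acc, remain)
  | fuel+1 =>
    if (remain - (t.length : Int)) - (t.length : Int) ≤ 0 then (acc ++ t, remain - (t.length : Int))
    else pvPadLoop t (acc ++ t) (remain - (t.length : Int)) fuel

-- A's `while end_idx <= traj_len:` loop; fuel only makes it total (never exhausted under Pre_)
def pvChunkLoop (t : List Int) (f : Int) (acc : List (List Int)) (start : Int) : Nat → List (List Int) × Int
  | 0 => (acc, start)
  | fuel+1 =>
    if start + f ≤ (t.length : Int) then
      pvChunkLoop t f (acc ++ [pvComp t start (start + f)]) (start + f) fuel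
    else (acc, start)

-- loop body of A's `for traj in trajs:`
def pvBodyA (fixed_len : Int) (acc : List (List Int)) (traj : List Int) : List (List Int) :=
  if (traj.length : Int) < fixed_len then
    let p := pvPadLoop traj [] fixed_len (fixed_len.toNat + 1)
    acc ++ [p.1 ++ pvComp traj 0 p.2]
  else
    let c := pvChunkLoop traj fixed_len acc 0 (traj.length + 1)
    if c.2 < (traj.length : Int) then
      c.1 ++ [pvComp traj c.2 (traj.length : Int) ++
              pvComp traj ((traj.length : Int) - (fixed_len - ((traj.length : Int) - c.2))) (traj.length : Int)]
    else c.1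

def split_fixed_length_traj (trajs : List (List Int)) (fixed_len : Int) : List (List Int) :=
  trajs.foldl (pvBodyA fixed_len) []

-- ===== PORT B =====

-- the up-front padded stream of one trajectory (B's `stream`)
def pvStream (traj : List Int) (f : Int) : List Int :=
  let n : Int := traj.length
  if n < f then
    (PySem.List.pyRange 0 f 1).map (fun i => PySem.List.pyGetD traj (PySem.Int.mod i n) 0)
  else
    let rem := PySem.Int.mod n f
    if rem ≠ 0 then traj ++ PySem.List.slice traj (some (n - (f - rem))) none
    else traj

-- B's loop body: `out += [stream[s:s+fixed_len] for s in range(0, len(stream), fixed_len)]`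
def pvBodyB (fixed_len : Int) (acc : List (List Int)) (traj : List Int) : List (List Int) :=
  let stream := pvStream traj fixed_len
  acc ++ (PySem.List.pyRange 0 (stream.length : Int) fixed_len).map
    (fun s => PySem.List.slice stream (some s) (some (s + fixed_len)))

def split_fixed_length_traj_alt (trajs : List (List Int)) (fixed_len : Int) : List (List Int) :=
  trajs.foldl (pvBodyB fixed_len) []

-- ===== PRECONDITION & SPEC =====
-- A diverges (never returns) when some traj is empty (its padding loop never shrinks) or when
-- trajs ≠ [] and fixed_len ≤ 0 (its chunk loop never terminates); Pre_ excludes exactly those.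
def Pre_split_fixed_length_traj (trajs : List (List Int)) (fixed_len : Int) : Prop :=
  (∀ t ∈ trajs, t ≠ []) ∧ (trajs = [] ∨ 1 ≤ fixed_len)
instance (trajs : List (List Int)) (fixed_len : Int) : Decidable (Pre_split_fixed_length_traj trajs fixed_len) := by unfold Pre_split_fixed_length_traj; infer_instance

def pvWitness_split_fixed_length_traj : List (List Int) × Int := ([[1, 2, 3], [4]], 2)

def Spec_split_fixed_length_traj (trajs : List (List Int)) (fixed_len : Int) (out : List (List Int)) : Prop := out = split_fixed_length_traj_alt trajs fixed_len
instance (trajs : List (List Int)) (fixed_len : Int) (out : List (List Int)) : Decidable (Spec_split_fixed_length_traj trajs fixed_len out) := by unfold Spec_split_fixed_length_traj; infer_instance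

-- ===== CLAIM (what is proved, stated in full; the proofs are below) =====
def Claim_equal_split_fixed_length_traj : Prop := ∀ (trajs : List (List Int)) (fixed_len : Int), Dom_split_fixed_length_traj trajs fixed_len → Pre_split_fixed_length_traj trajs fixed_len → Spec_split_fixed_length_traj trajs fixed_len (split_fixed_length_traj trajs fixed_len)

-- ===== LEMMAS AND PROOFS =====

-- the loops thread their accumulator; pull it out
theorem pvPadLoop_acc (t : List Int) : ∀ (fuel : Nat) (acc : List Int) (r : Int),
    pvPadLoop t acc r fuel = (acc ++ (pvPadLoop t [] r fuel).1, (pvPadLoop t [] r fuel).2) := by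
  intro fuel
  induction fuel with
  | zero => intro acc r; simp [pvPadLoop]
  | succ n ih =>
    intro acc r
    simp only [pvPadLoop]
    split
    · simp
    · rw [ih (acc ++ t), ih ([] ++ t)]
      simp

theorem pvChunkLoop_acc (t : List Int) (f : Int) : ∀ (fuel : Nat) (acc : List (List Int)) (s : Int),
    pvChunkLoop t f acc s fuel = (acc ++ (pvChunkLoop t f [] s fuel).1, (pvChunkLoop t f [] s fuel).2) := by
  intro fuel
  induction fuel with
  | zero => intro acc s; simp [pvChunkLoop]
  | succ n ih =>
    intro acc s
    simp only [pvChunkLoop]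
    split
    · rw [ih (acc ++ [pvComp t s (s + f)]), ih ([] ++ [pvComp t s (s + f)])]
      simp
    · simp

theorem pvComp_eq_drop_take (t : List Int) {a b : Int} (h0 : 0 ≤ a) (hab : a ≤ b)
    (hb : b ≤ (t.length : Int)) :
    pvComp t a b = (t.drop a.toNat).take (b.toNat - a.toNat) := by
  unfold pvComp
  rw [PySem.List.pyRange_one, List.map_map]
  apply List.ext_getElem
  · simp; omega
  · intro k h1 h2
    simp only [List.getElem_map, List.getElem_range, Function.comp]
    rw [List.getElem_take, List.getElem_drop]
    rw [PySem.List.pyGetD_eq_getElem t 0 (by omega) (by simp at h1; omega)]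
    congr 1
    simp at h1; omega

theorem pvComp_to_end (t : List Int) {a : Int} (h0 : 0 ≤ a) (ha : a ≤ (t.length : Int)) :
    pvComp t a (t.length : Int) = t.drop a.toNat := by
  rw [pvComp_eq_drop_take t h0 ha le_rfl]
  apply List.take_of_length_le
  simp

-- stepped range: peel the head / empty range
theorem pvRange_pos_cons {a b s : Int} (hs : 0 < s) (hab : a < b) :
    PySem.List.pyRange a b s = a :: PySem.List.pyRange (a + s) b s := by
  rw [PySem.List.pyRange_of_pos _ _ hs, PySem.List.pyRange_of_pos _ _ hs, if_pos hab]
  by_cases h2 : a + s < b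
  · rw [if_pos h2]
    have key : (b - a + s - 1) / s = (b - (a + s) + s - 1) / s + 1 := by
      have e : b - a + s - 1 = (b - (a + s) + s - 1) + 1 * s := by ring
      rw [e, Int.add_mul_ediv_right _ _ (by omega)]
    have hge : 0 ≤ (b - (a + s) + s - 1) / s := Int.ediv_nonneg (by omega) (by omega)
    rw [key]
    have h3 : ((b - (a + s) + s - 1) / s + 1).toNat = ((b - (a + s) + s - 1) / s).toNat + 1 := by omega
    rw [h3, List.range_succ_eq_map, List.map_cons, List.map_map]
    congr 1
    · simp
    · apply List.map_congr_left
      intro k _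
      simp [Function.comp]
      ring
  · rw [if_neg h2]
    have h1 : (b - a + s - 1) / s = 1 := by
      have e : b - a + s - 1 = (b - a - 1) + 1 * s := by ring
      rw [e, Int.add_mul_ediv_right _ _ (by omega),
          Int.ediv_eq_zero_of_lt (by omega) (by omega)]
      omega
    rw [h1]
    simp

theorem pvRange_pos_nil {a b s : Int} (hs : 0 < s) (h : b ≤ a) :
    PySem.List.pyRange a b s = [] := by
  rw [PySem.List.pyRange_of_pos _ _ hs, if_neg (by omega)]
  simp

-- a stepped range one full step past a multiple of the step splits off its last point
theorem pvRange_split (s : Int) (hs : 0 < s) : ∀ (k : Nat) (a L : Int), L - a = s * k →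
    PySem.List.pyRange a (L + s) s = PySem.List.pyRange a L s ++ [L] := by
  intro k
  induction k with
  | zero =>
    intro a L h
    have ha : a = L := by omega
    subst ha
    rw [pvRange_pos_cons hs (by omega), pvRange_pos_nil hs (by omega),
        pvRange_pos_nil hs (by omega)]
    simp
  | succ m ih =>
    intro a L h
    have hal : a < L := by nlinarith [Int.ofNat_lt.mpr (Nat.succ_pos m)]
    rw [pvRange_pos_cons hs (by omega), pvRange_pos_cons (a := a) (b := L) hs hal,
        ih (a + s) L (by push_cast at h ⊢; ring_nf; ring_nf at h; omega)]
    simp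

-- the cyclic closed form below one period is a plain prefix comprehension
theorem pvCyc_small (t : List Int) {r : Int} (ht : t ≠ []) (h0 : 0 ≤ r) (hr : r ≤ (t.length : Int)) :
    (PySem.List.pyRange 0 r 1).map (fun i => PySem.List.pyGetD t (PySem.Int.mod i (t.length : Int)) 0) =
      pvComp t 0 r := by
  have hn : (0:Int) < t.length := by
    have := List.length_pos_iff.mpr ht; exact_mod_cast this
  apply List.map_congr_left
  intro i hi
  rw [PySem.List.mem_pyRange_one] at hi
  rw [PySem.Int.mod_eq_emod_of_pos hn, Int.emod_eq_of_lt (by omega) (by omega)]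

-- the cyclic closed form, peeled once
theorem pvCyc_peel (t : List Int) (L : Int) (ht : t ≠ []) (hNL : (t.length : Int) ≤ L) :
    (PySem.List.pyRange 0 L 1).map (fun i => PySem.List.pyGetD t (PySem.Int.mod i (t.length : Int)) 0) =
      t ++ (PySem.List.pyRange 0 (L - (t.length : Int)) 1).map
        (fun i => PySem.List.pyGetD t (PySem.Int.mod i (t.length : Int)) 0) := by
  have hn : (0:Int) < t.length := by
    have := List.length_pos_iff.mpr ht; exact_mod_cast this
  rw [PySem.List.pyRange_one_append 0 (t.length : Int) L (by omega) hNL, List.map_append]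
  congr 1
  · rw [pvCyc_small t ht (by omega) (by omega)]
    unfold pvComp
    have := PySem.List.map_pyGetD_pyRange_zero t 0
    simpa [PySem.List.len] using this
  · rw [PySem.List.pyRange_one ((t.length : Int)) L, PySem.List.pyRange_one 0 (L - (t.length : Int)),
        List.map_map, List.map_map]
    rw [show L - (t.length : Int) - 0 = L - (t.length : Int) by ring]
    apply List.map_congr_left
    intro k _
    simp only [Function.comp]
    congr 1
    rw [PySem.Int.mod_eq_emod_of_pos hn, PySem.Int.mod_eq_emod_of_pos hn]
    have e : (t.length : Int) + (k : Int) = ((0:Int) + k) + (t.length : Int) * 1 := by ring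
    rw [e, Int.add_mul_emod_self_left]

-- A's padding loop computes the cyclic closed form
theorem pvPad_main (t : List Int) (ht : t ≠ []) : ∀ (fuel : Nat) (L : Int),
    (t.length : Int) < L → L ≤ (t.length : Int) * fuel →
    (pvPadLoop t [] L fuel).1 ++ pvComp t 0 (pvPadLoop t [] L fuel).2 =
      (PySem.List.pyRange 0 L 1).map (fun i => PySem.List.pyGetD t (PySem.Int.mod i (t.length : Int)) 0) := by
  have hn : (0:Int) < t.length := by
    have := List.length_pos_iff.mpr ht; exact_mod_cast this
  intro fuel
  induction fuel with
  | zero => intro L h1 h2; simp at h2; omega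
  | succ n ih =>
    intro L h1 h2
    simp only [pvPadLoop]
    split
    · rename_i hbr
      simp only [List.nil_append]
      rw [pvCyc_peel t L ht (by omega), pvCyc_small t ht (by omega) (by omega)]
    · rename_i hbr
      rw [pvPadLoop_acc, List.nil_append]
      rw [List.append_assoc, ih (L - (t.length : Int)) (by omega) ?bound]
      · rw [← pvCyc_peel t L ht (by omega)]
      · have e : (t.length : Int) * ((n:Int) + 1) = (t.length : Int) * n + (t.length : Int) := by ring
        push_cast at h2
        rw [e] at h2
        omega

-- A's chunk loop computes the stepped-range comprehension
theorem pvChunk_main (t : List Int) (f : Int) (hf : 0 < f) : ∀ (fuel : Nat) (s : Int),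
    0 ≤ s → s ≤ (t.length : Int) → (t.length : Int) - s ≤ f * fuel →
    pvChunkLoop t f [] s fuel =
      ((PySem.List.pyRange s ((t.length : Int) - ((t.length : Int) - s) % f) f).map
         (fun x => pvComp t x (x + f)),
       (t.length : Int) - ((t.length : Int) - s) % f) := by
  intro fuel
  induction fuel with
  | zero =>
    intro s h0 h1 h2
    simp only [Nat.cast_zero, mul_zero] at h2
    have hs : s = (t.length : Int) := by omega
    subst hs
    simp only [pvChunkLoop, sub_self, Int.zero_emod, sub_zero]
    rw [pvRange_pos_nil hf (by omega)]
    simp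
  | succ n ih =>
    intro s h0 h1 h2
    have hmn : 0 ≤ ((t.length : Int) - s) % f := Int.emod_nonneg _ (by omega)
    have hml : ((t.length : Int) - s) % f < f := Int.emod_lt_of_pos _ hf
    simp only [pvChunkLoop]
    split
    · rename_i hbr
      rw [pvChunkLoop_acc, List.nil_append]
      rw [ih (s + f) (by omega) (by omega) ?bound]
      case bound =>
        have e : f * ((n:Int) + 1) = f * n + f := by ring
        push_cast at h2
        rw [e] at h2
        omega
      have hmeq : ((t.length : Int) - s) % f = ((t.length : Int) - (s + f)) % f := by
        have e : (t.length : Int) - s = ((t.length : Int) - (s + f)) + f * 1 := by ring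
        rw [e, Int.add_mul_emod_self_left]
      rw [← hmeq]
      have hlt : s < (t.length : Int) - ((t.length : Int) - s) % f := by omega
      rw [pvRange_pos_cons hf hlt, List.map_cons]
      simp
    · rename_i hbr
      have hmeq : ((t.length : Int) - s) % f = (t.length : Int) - s :=
        Int.emod_eq_of_lt (by omega) (by omega)
      rw [hmeq]
      have e : (t.length : Int) - ((t.length : Int) - s) = s := by ring
      rw [e, pvRange_pos_nil hf (by omega)]
      simp

theorem pvBodyA_acc (f : Int) (acc : List (List Int)) (t : List Int) :
    pvBodyA f acc t = acc ++ pvBodyA f [] t := by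
  unfold pvBodyA
  split
  · simp
  · rw [pvChunkLoop_acc]
    simp only []
    split <;> simp

theorem pvFoldl_bodyA (f : Int) : ∀ (trajs : List (List Int)) (acc : List (List Int)),
    trajs.foldl (pvBodyA f) acc = acc ++ trajs.flatMap (pvBodyA f []) := by
  intro trajs
  induction trajs with
  | nil => intro acc; simp
  | cons t ts ih =>
    intro acc
    rw [List.foldl_cons, ih, pvBodyA_acc, List.flatMap_cons]
    simp

theorem pvFoldl_bodyB (f : Int) : ∀ (trajs : List (List Int)) (acc : List (List Int)),
    trajs.foldl (pvBodyB f) acc = acc ++ trajs.flatMap (pvBodyB f []) := by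
  intro trajs
  induction trajs with
  | nil => intro acc; simp
  | cons t ts ih =>
    intro acc
    rw [List.foldl_cons, ih]
    simp [pvBodyB]

-- a slice inside the first part of an append ignores the second part
theorem pvSlice_append_left (t u : List Int) {a b : Int} (h0 : 0 ≤ a) (hab : a ≤ b)
    (hb : b ≤ (t.length : Int)) :
    PySem.List.slice (t ++ u) (some a) (some b) = PySem.List.slice t (some a) (some b) := by
  rw [PySem.List.slice_toNat _ h0 (by omega), PySem.List.slice_toNat _ h0 (by omega)]
  rw [List.drop_append_of_le_length (by omega)]
  rw [List.take_append_of_le_length]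
  rw [List.length_drop]
  omega

-- the heart: per-trajectory agreement
theorem pvPerTraj (t : List Int) (f : Int) (ht : t ≠ []) (hf : 1 ≤ f) :
    pvBodyA f [] t = pvBodyB f [] t := by
  have hn : (0:Int) < t.length := by
    have := List.length_pos_iff.mpr ht; exact_mod_cast this
  have hf0 : (0:Int) < f := by omega
  unfold pvBodyA pvBodyB pvStream
  by_cases h : (t.length : Int) < f
  · rw [if_pos h, if_pos h]
    simp only [List.nil_append]
    have hlen : ((((PySem.List.pyRange 0 f 1).map
        (fun i => PySem.List.pyGetD t (PySem.Int.mod i (t.length : Int)) 0)).length : Int)) = f := by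
      simp [PySem.List.length_pyRange_one]
      omega
    rw [hlen]
    rw [pvRange_pos_cons hf0 hf0, pvRange_pos_nil hf0 (by omega), List.map_cons, List.map_nil]
    rw [PySem.List.slice_toNat _ le_rfl (by omega)]
    simp only [Int.toNat_zero, List.drop_zero, zero_add]
    rw [List.take_of_length_le (by simp [PySem.List.length_pyRange_one])]
    congr 1
    apply pvPad_main t ht (f.toNat + 1) f h
    have e1 : ((f.toNat : Int)) = f := by omega
    push_cast
    nlinarith
  · rw [if_neg h, if_neg h]
    push Not at h
    have hfuel : (t.length : Int) - 0 ≤ f * ((t.length + 1 : Nat) : Int) := by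
      push_cast; nlinarith
    rw [pvChunk_main t f hf0 (t.length + 1) 0 le_rfl (by omega) hfuel]
    simp only [sub_zero]
    rw [PySem.Int.mod_eq_emod_of_pos hf0]
    have hmn : 0 ≤ (t.length : Int) % f := Int.emod_nonneg _ (by omega)
    have hml : (t.length : Int) % f < f := Int.emod_lt_of_pos _ hf0
    have hdvd : f ∣ (t.length : Int) - (t.length : Int) % f := by
      have := Int.mul_ediv_add_emod (t.length : Int) f
      exact ⟨(t.length : Int) / f, by omega⟩
    by_cases hrem : (t.length : Int) % f = 0
    · simp only [hrem, sub_zero] at hdvd ⊢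
      rw [if_neg (by omega), if_neg (by simp)]
      simp only [List.nil_append]
      apply List.map_congr_left
      intro x hx
      rw [PySem.List.mem_pyRange_iff_of_pos hf0] at hx
      obtain ⟨hx0, hx1, hx2⟩ := hx
      have hxd : f ∣ (t.length : Int) - x := by
        have e : (t.length : Int) - x = (t.length : Int) - (x - 0) := by ring
        rw [e]; exact dvd_sub hdvd hx2
      have hxf : x + f ≤ (t.length : Int) := by
        have hle := Int.le_of_dvd (by omega) hxd
        omega
      rw [pvComp_eq_drop_take t hx0 (by omega) (by omega),
          PySem.List.slice_toNat t hx0 (by omega)]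
    · rw [if_pos (by omega), if_pos hrem]
      simp only [List.nil_append]
      -- stream = t ++ u with u the copied tail
      set u := PySem.List.slice t (some ((t.length : Int) - (f - (t.length : Int) % f))) none with hu
      have hu' : u = t.drop ((t.length : Int) - (f - (t.length : Int) % f)).toNat := by
        rw [hu, PySem.List.slice_from t (by omega)]
      have hulen : ((u.length : Int)) = f - (t.length : Int) % f := by
        rw [hu']; simp [List.length_drop]; omega
      have hslen : (((t ++ u).length : Int)) = ((t.length : Int) - (t.length : Int) % f) + f := by
        simp [List.length_append]; omega
      rw [hslen]
      obtain ⟨q, hq⟩ := hdvd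
      have hq0 : 0 ≤ q := by nlinarith
      rw [pvRange_split f hf0 q.toNat 0 ((t.length : Int) - (t.length : Int) % f)
            (by rw [Int.toNat_of_nonneg hq0, hq]; ring), List.map_append, List.map_cons, List.map_nil]
      congr 1
      · -- full chunks live inside t
        apply List.map_congr_left
        intro x hx
        rw [PySem.List.mem_pyRange_iff_of_pos hf0] at hx
        obtain ⟨hx0, hx1, hx2⟩ := hx
        have hxd : f ∣ ((t.length : Int) - (t.length : Int) % f) - x := by
          have e : ((t.length : Int) - (t.length : Int) % f) - x =
              ((t.length : Int) - (t.length : Int) % f) - (x - 0) := by ring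
          rw [e]; exact dvd_sub ⟨q, hq⟩ hx2
        have hxf : x + f ≤ (t.length : Int) - (t.length : Int) % f := by
          have hle := Int.le_of_dvd (by omega) hxd
          omega
        rw [pvSlice_append_left t u hx0 (by omega) (by omega),
            pvComp_eq_drop_take t hx0 (by omega) (by omega),
            PySem.List.slice_toNat t hx0 (by omega)]
      · -- the last chunk is the remainder followed by the copied tail
        congr 1
        rw [PySem.List.slice_toNat _ (by omega) (by omega)]
        rw [List.take_of_length_le (by simp [List.length_drop]; omega)]
        rw [List.drop_append_of_le_length (by omega)]
        rw [pvComp_to_end t (by omega) (by omega), pvComp_to_end t (by omega) (by omega)]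
        rw [hu']
        have e3 : ((t.length : Int) - (f - ((t.length : Int) - ((t.length : Int) - (t.length : Int) % f)))) =
            (t.length : Int) - (f - (t.length : Int) % f) := by ring
        rw [e3]

-- ===== VERDICT (by name: the statement is the Claim_ definition above) =====
theorem split_fixed_length_traj_spec : Claim_equal_split_fixed_length_traj := by
  intro trajs fixed_len hDom hPre
  obtain ⟨hne, hcase⟩ := hPre
  unfold Spec_split_fixed_length_traj split_fixed_length_traj split_fixed_length_traj_alt
  rcases hcase with h | hf
  · subst h; rfl
  · rw [pvFoldl_bodyA, pvFoldl_bodyB, List.nil_append, List.nil_append]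
    clear hDom
    induction trajs with
    | nil => rfl
    | cons t ts ih =>
      rw [List.flatMap_cons, List.flatMap_cons,
          pvPerTraj t fixed_len (hne t (by simp)) hf,
          ih (fun x hx => hne x (by simp [hx]))]
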